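-- pv_equiv track=rewrite | github.com/Elaine1009/IndividualProject | ip_ind_chen5047.py | sortmycard
-- ===== SOURCE A (Python) =====
-- def sortmycard(random_item): # turn 1D into 2D list
--     startid = 0
--     endid = 0
--     mysortedcards = []
--     mycards = random_item[:]
--     mycards.sort()
--     for i in range(1, len(mycards)):
--         if mycards[i-1][0] != mycards[i][0]:
--             endid = i
--             arr = mycards[startid:endid]
--             startid = i
--             mysortedcards.append(arr)
--     endid = len(mycards)
--     arr = mycards[startid:endid]
--     mysortedcards.append(arr)
--     return mysortedcards
-- ===== SOURCE B (Python) =====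
-- def sortmycard(random_item): # turn 1D into 2D list
--     groups = {}
--     for card in sorted(random_item):
--         groups.setdefault(card[0], []).append(card)
--     return list(groups.values())
-- ===== Notes on version B (the rewrite author's own statement) =====
-- stated objective: idiomatic
-- what changed: Replaces A's index bookkeeping (boundary detection over range(1,n) plus startid/endid slicing) with a single pass over the sorted list that groups cards into a dict keyed by first character via setdefault, returning the dict's values.
-- intended difference: On the empty list A returns [[]] (one empty group, an artefact of its unconditional final slice-append) while B returns [] (no cards, no groups), which is the intended value. — e.g. on sortmycard([]): A returns [[]], B returns []
-- outside the precondition, e.g. on sortmycard(['']): A returns [['']], B raises IndexError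
import Mathlib
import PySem

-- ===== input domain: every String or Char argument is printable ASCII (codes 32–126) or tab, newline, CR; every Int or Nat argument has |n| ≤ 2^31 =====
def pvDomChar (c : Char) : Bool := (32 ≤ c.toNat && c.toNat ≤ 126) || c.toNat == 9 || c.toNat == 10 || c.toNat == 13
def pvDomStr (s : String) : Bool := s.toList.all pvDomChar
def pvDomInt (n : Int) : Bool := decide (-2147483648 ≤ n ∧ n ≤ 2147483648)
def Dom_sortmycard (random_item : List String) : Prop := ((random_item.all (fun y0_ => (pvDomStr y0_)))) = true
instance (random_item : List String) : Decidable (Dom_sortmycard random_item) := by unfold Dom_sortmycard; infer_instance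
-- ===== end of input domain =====

-- B replaces A's index bookkeeping (boundary detection over range(1,n) with startid/endid
-- slicing) by one idiomatic pass over the sorted list grouping into a dict keyed by the first
-- character; on the empty list A returns [[]] while B returns the intended [].

-- ===== PORT A =====
def sortmycard (random_item : List String) : List (List String) :=
  -- mycards = random_item[:]; mycards.sort()
  let mycards := PySem.List.sorted random_item (fun x => x) false
  -- for i in range(1, len(mycards)): state (startid, endid, mysortedcards)
  -- mycards[i-1] / mycards[i]: i from range(1, len) is always in bounds, so pyGetD is exact;
  -- mycards[_][0] is PySem.Str.pyGet? _ 0 (none = IndexError on "", excluded by Pre_)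
  let st := (PySem.List.pyRange 1 (mycards.length : Int) 1).foldl
    (fun (st : Int × Int × List (List String)) (i : Int) =>
      if PySem.Str.pyGet? (PySem.List.pyGetD mycards (i - 1) "") 0 ≠
         PySem.Str.pyGet? (PySem.List.pyGetD mycards i "") 0 then
        -- endid = i; arr = mycards[startid:endid]; startid = i; mysortedcards.append(arr)
        (i, i, st.2.2 ++ [PySem.List.slice mycards (some st.1) (some i)])
      else st)
    ((0 : Int), (0 : Int), ([] : List (List String)))
  -- endid = len(mycards); arr = mycards[startid:endid]; mysortedcards.append(arr)
  st.2.2 ++ [PySem.List.slice mycards (some st.1) (some (mycards.length : Int))]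

-- ===== PORT B =====
def sortmycard_alt (random_item : List String) : List (List String) :=
  -- groups.setdefault(card[0], []).append(card)  ==  groups[card[0]] = groups.get(card[0], []) + [card]
  PySem.Dict.values
    ((PySem.List.sorted random_item (fun x => x) false).foldl
      (fun (g : PySem.Dict (Option Char) (List String)) (card : String) =>
        g.modify (PySem.Str.pyGet? card 0) ([] : List String) (fun l => l ++ [card]))
      (PySem.Dict.mk []))

-- ===== PRECONDITION & SPEC =====
-- Pre_ excludes lists containing an empty string: there Python A raises IndexError as soon as the
-- list has two or more elements, and Python B raises IndexError whenever "" is present (in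
-- particular on [""], where A still returns [[""]] — see the cite in the claim).
def Pre_sortmycard (random_item : List String) : Prop := "" ∉ random_item
instance (random_item : List String) : Decidable (Pre_sortmycard random_item) := by unfold Pre_sortmycard; infer_instance
def pvWitness_sortmycard : List String := ["b1", "a2", "a3"]

-- On the empty list A returns [[]] (one empty group, an artefact of its unconditional final
-- slice-append) while B returns the intended [] (no cards, no groups).
def D_sortmycard (random_item : List String) : Prop := random_item = []
instance (random_item : List String) : Decidable (D_sortmycard random_item) := by unfold D_sortmycard; infer_instance

def Spec_sortmycard (random_item : List String) (out : List (List String)) : Prop :=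
  ¬ D_sortmycard random_item → out = sortmycard_alt random_item
instance (random_item : List String) (out : List (List String)) : Decidable (Spec_sortmycard random_item out) := by unfold Spec_sortmycard; infer_instance

def pvDiffWitness_sortmycard : List String := []
def pvDiffWitnessOut_sortmycard : (List (List String)) × (List (List String)) := ([[]], [])

-- ===== CLAIM (what is proved, stated in full; the proofs are below) =====
def Claim_unchanged_sortmycard : Prop := ∀ (random_item : List String), Dom_sortmycard random_item → Pre_sortmycard random_item → Spec_sortmycard random_item (sortmycard random_item)
def Claim_changed_sortmycard : Prop := Dom_sortmycard (pvDiffWitness_sortmycard) ∧ Pre_sortmycard (pvDiffWitness_sortmycard) ∧ D_sortmycard (pvDiffWitness_sortmycard) ∧ sortmycard (pvDiffWitness_sortmycard) = pvDiffWitnessOut_sortmycard.1 ∧ sortmycard_alt (pvDiffWitness_sortmycard) = pvDiffWitnessOut_sortmycard.2 ∧ pvDiffWitnessOut_sortmycard.1 ≠ pvDiffWitnessOut_sortmycard.2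
def Claim_exact_sortmycard : Prop := ∀ (random_item : List String), Dom_sortmycard random_item → Pre_sortmycard random_item → D_sortmycard random_item → sortmycard random_item ≠ sortmycard_alt random_item

-- ===== LEMMAS AND PROOFS =====

-- the first character of a card, as both ports compare it
def pvKey (s : String) : Option Char := PySem.Str.pyGet? s 0

-- ≤ on keys (none = empty string first, matching the lexicographic string order)
def pvKle : Option Char → Option Char → Prop
  | none, _ => True
  | some _, none => False
  | some x, some y => x ≤ y

def pvKlt (a b : Option Char) : Prop := pvKle a b ∧ a ≠ b

-- common reference: group a list into maximal runs of equal first character, left to right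
def pvRunsAux (acc : List (List String)) (cur : List String) (lastc : String) :
    List String → List (List String)
  | [] => acc ++ [cur]
  | c :: cs =>
      if pvKey lastc = pvKey c then pvRunsAux acc (cur ++ [c]) c cs
      else pvRunsAux (acc ++ [cur]) [c] c cs

def pvGrp : List String → List (List String)
  | [] => []
  | c :: cs => pvRunsAux [] [c] c cs

-- A's loop body and loop, named for the proofs (definitionally the fold inside sortmycard)
def pvStepA (ys : List String) (st : Int × Int × List (List String)) (i : Int) :
    Int × Int × List (List String) :=
  if PySem.Str.pyGet? (PySem.List.pyGetD ys (i - 1) "") 0 ≠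
     PySem.Str.pyGet? (PySem.List.pyGetD ys i "") 0 then
    (i, i, st.2.2 ++ [PySem.List.slice ys (some st.1) (some i)])
  else st

def pvAcore (ys : List String) (m : Int) : Int × Int × List (List String) :=
  (PySem.List.pyRange 1 m 1).foldl (pvStepA ys) ((0 : Int), (0 : Int), ([] : List (List String)))

-- B's loop body, named for the proofs
def pvStepB (g : PySem.Dict (Option Char) (List String)) (card : String) :
    PySem.Dict (Option Char) (List String) :=
  g.modify (PySem.Str.pyGet? card 0) ([] : List String) (fun l => l ++ [card])

lemma pvKey_eq (u : String) : pvKey u = u.toList[0]? := by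
  simpa using PySem.Str.pyGet?_natCast u 0

lemma pvKle_mono (s t : String) (h : s ≤ t) : pvKle (pvKey s) (pvKey t) := by
  have hlt : ¬ t < s := not_lt_of_ge h
  rw [String.lt_iff_toList_lt] at hlt
  rw [pvKey_eq, pvKey_eq]
  rcases hs : s.toList with _ | ⟨a, as⟩
  · simp [pvKle]
  · rcases ht : t.toList with _ | ⟨b, bs⟩
    · exact absurd (by rw [hs, ht]; exact List.nil_lt_cons a as) hlt
    · simp only [List.getElem?_cons_zero]
      show a ≤ b
      by_contra hab
      exact hlt (by rw [hs, ht]; exact List.cons_lt_cons_iff.mpr (Or.inl (lt_of_not_ge hab)))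

lemma pvKle_antisymm (a b : Option Char) (h1 : pvKle a b) (h2 : pvKle b a) : a = b := by
  cases a <;> cases b <;> simp_all [pvKle]
  exact le_antisymm h1 h2

lemma pvKle_trans (a b c : Option Char) (h1 : pvKle a b) (h2 : pvKle b c) : pvKle a c := by
  cases a <;> cases b <;> cases c <;> simp_all [pvKle]
  exact le_trans h1 h2

lemma pvKlt_trans (a b c : Option Char) (h1 : pvKlt a b) (h2 : pvKlt b c) : pvKlt a c := by
  refine ⟨pvKle_trans a b c h1.1 h2.1, ?_⟩
  rintro rfl
  exact h1.2 (pvKle_antisymm a b h1.1 h2.1)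

-- Dict.modify appends a fresh key at the end
lemma pv_modify_absent {κ ν : Type} [BEq κ] [LawfulBEq κ]
    (d : PySem.Dict κ ν) (k : κ) (dflt : ν) (f : ν → ν)
    (h : ∀ p ∈ d.items, p.1 ≠ k) :
    (d.modify k dflt f).items = d.items ++ [(k, f dflt)] := by
  have hc : d.contains k = false := by
    simp only [PySem.Dict.contains, List.any_eq_false]
    intro p hp
    simp [h p hp]
  simp [PySem.Dict.modify, PySem.Dict.insert, hc, PySem.Dict.getD_of_not_contains d dflt hc]

-- Dict.modify on the key of the last entry rewrites that entry in place
lemma pv_modify_present_last {κ ν : Type} [BEq κ] [LawfulBEq κ]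
    (d : PySem.Dict κ ν) (ps : List (κ × ν)) (k : κ) (v : ν) (dflt : ν) (f : ν → ν)
    (hitems : d.items = ps ++ [(k, v)]) (hps : ∀ p ∈ ps, p.1 ≠ k) :
    (d.modify k dflt f).items = ps ++ [(k, f v)] := by
  have hc : d.contains k = true := by
    simp [PySem.Dict.contains, hitems]
  have hfind : d.items.find? (fun p => p.1 == k) = some (k, v) := by
    rw [hitems, List.find?_append]
    have : ps.find? (fun p => p.1 == k) = none := by
      rw [List.find?_eq_none]
      intro p hp; simp [hps p hp]
    simp [this]
  have hget : d.getD k dflt = v := by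
    simp [PySem.Dict.getD, PySem.Dict.get?, hfind]
  simp only [PySem.Dict.modify, PySem.Dict.insert, hc, if_true, hget, hitems, List.map_append]
  congr 1
  · calc ps.map (fun p => if (p.1 == k) = true then (k, f v) else p)
        = ps.map id := List.map_congr_left (fun p hp => by simp [hps p hp])
      _ = ps := List.map_id ps
  · simp

-- A's loop invariant: after iterations i = 1 .. m-1 the accumulated groups plus the open run
-- [startid, m) feed pvRunsAux into pvGrp of the whole list
lemma pv_A_inv (ys : List String) :
    ∀ m : Nat, 1 ≤ m → m ≤ ys.length →
    ∃ (s : Nat) (e : Int) (acc : List (List String)),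
      pvAcore ys (m : Int) = ((s : Int), e, acc) ∧ s < m ∧
      pvRunsAux acc ((ys.drop s).take (m - s)) (ys.getD (m - 1) "") (ys.drop m) = pvGrp ys := by
  intro m hm
  induction m, hm using Nat.le_induction with
  | base =>
    intro hlen
    rcases ys with _ | ⟨y, t⟩
    · simp at hlen
    · refine ⟨0, 0, [], ?_, by omega, ?_⟩
      · unfold pvAcore
        rw [PySem.List.pyRange_one_eq_nil (by norm_num)]
        simp
      · simp [pvGrp]
  | succ n hn ih =>
    intro hlen
    obtain ⟨s, e, acc, hfold, hs, hrun⟩ := ih (by omega)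
    have hnlt : n < ys.length := by omega
    have hc : ys[n] = ys.getD n "" := (List.getD_eq_getElem ys "" hnlt).symm
    have hdropn : ys.drop n = ys.getD n "" :: ys.drop (n + 1) := by
      rw [List.drop_eq_getElem_cons hnlt, hc]
    have hcore : pvAcore ys ((n + 1 : Nat) : Int) = pvStepA ys (pvAcore ys (n : Int)) (n : Int) := by
      unfold pvAcore
      have h1 : ((n + 1 : Nat) : Int) = (n : Int) + 1 := by push_cast; ring
      rw [h1, PySem.List.pyRange_one_succ_right (by exact_mod_cast hn), List.foldl_append]
      simp
    have hcond : pvStepA ys ((s : Int), e, acc) (n : Int) =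
        if pvKey (ys.getD (n - 1) "") ≠ pvKey (ys.getD n "") then
          ((n : Int), (n : Int), acc ++ [PySem.List.slice ys (some (s : Int)) (some (n : Int))])
        else ((s : Int), e, acc) := by
      unfold pvStepA
      have h2 : ((n : Int) - 1) = ((n - 1 : Nat) : Int) := by omega
      rw [h2, PySem.List.pyGetD_natCast, PySem.List.pyGetD_natCast]
      rfl
    have hslice : PySem.List.slice ys (some (s : Int)) (some (n : Int)) = (ys.drop s).take (n - s) :=
      PySem.List.slice_natCast ys s n
    by_cases hkey : pvKey (ys.getD (n - 1) "") = pvKey (ys.getD n "")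
    · refine ⟨s, e, acc, ?_, by omega, ?_⟩
      · rw [hcore, hfold, hcond, if_neg (by simpa using hkey)]
      · have hlt : n - s < (ys.drop s).length := by simp; omega
        have hcur : (ys.drop s).take (n + 1 - s) = (ys.drop s).take (n - s) ++ [ys.getD n ""] := by
          have h3 : n + 1 - s = (n - s) + 1 := by omega
          have h5 : s + (n - s) = n := by omega
          have h4 : (ys.drop s)[n - s]'hlt = ys.getD n "" := by
            simp only [List.getElem_drop, h5]
            exact hc
          rw [h3, List.take_succ_eq_append_getElem hlt, h4]
        rw [hdropn] at hrun
        simp only [pvRunsAux, if_pos hkey] at hrun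
        rw [hcur]
        simpa using hrun
    · refine ⟨n, (n : Int), acc ++ [(ys.drop s).take (n - s)], ?_, by omega, ?_⟩
      · rw [hcore, hfold, hcond, if_pos (by simpa using hkey), hslice]
      · have hcur : (ys.drop n).take (n + 1 - n) = [ys.getD n ""] := by
          rw [hdropn]
          simp [show n + 1 - n = 1 from by omega]
        rw [hdropn] at hrun
        simp only [pvRunsAux, if_neg hkey] at hrun
        rw [hcur]
        simpa using hrun

lemma pv_A_eq (ri : List String) (h : ri ≠ []) :
    sortmycard ri = pvGrp (PySem.List.sorted ri (fun x => x) false) := by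
  have hys : PySem.List.sorted ri (fun x => x) false ≠ [] := fun hE =>
    h ((PySem.List.sorted_eq_nil_iff ri (fun x => x) false).mp hE)
  set ys := PySem.List.sorted ri (fun x => x) false with hysdef
  have hlen : 1 ≤ ys.length := List.length_pos_iff.mpr hys
  obtain ⟨s, e, acc, hfold, hs, hrun⟩ := pv_A_inv ys ys.length hlen le_rfl
  have hA : sortmycard ri = (pvAcore ys (ys.length : Int)).2.2 ++
      [PySem.List.slice ys (some (pvAcore ys (ys.length : Int)).1) (some (ys.length : Int))] := rfl
  rw [hA, hfold]
  show acc ++ [PySem.List.slice ys (some (s : Int)) (some ((ys.length : Nat) : Int))] = _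
  rw [PySem.List.slice_natCast ys s ys.length]
  rw [List.drop_length] at hrun
  simpa [pvRunsAux] using hrun

-- B's loop invariant: the dict holds the closed groups and the open run, keys strictly
-- increasing, while the remaining cards' keys continue the chain
lemma pv_B_inv :
    ∀ (rest : List String) (d : PySem.Dict (Option Char) (List String))
      (ps : List (Option Char × List String)) (cur : List String) (lastc : String),
      d.items = ps ++ [(pvKey lastc, cur)] →
      (ps.map Prod.fst ++ [pvKey lastc]).Pairwise pvKlt →
      (List.map pvKey (lastc :: rest)).IsChain pvKle →
      PySem.Dict.values (rest.foldl pvStepB d) = pvRunsAux (ps.map Prod.snd) cur lastc rest := by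
  intro rest
  induction rest with
  | nil =>
    intro d ps cur lastc hitems _ _
    simp [PySem.Dict.values, hitems, pvRunsAux]
  | cons c cs ih =>
    intro d ps cur lastc hitems hpw hch
    simp only [List.map_cons, List.isChain_cons_cons] at hch
    obtain ⟨hlc, hch'⟩ := hch
    have hlast_klt : ∀ x ∈ ps.map Prod.fst, pvKlt x (pvKey lastc) := by
      intro x hx
      exact (List.pairwise_append.mp hpw).2.2 x hx (pvKey lastc) (by simp)
    have hps_ne : ∀ p ∈ ps, p.1 ≠ pvKey lastc := by
      intro p hp
      exact (hlast_klt p.1 (List.mem_map_of_mem hp)).2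
    rw [List.foldl_cons]
    by_cases hk : pvKey lastc = pvKey c
    · have hstep : (pvStepB d c).items = ps ++ [(pvKey lastc, cur ++ [c])] := by
        have := pv_modify_present_last d ps (pvKey lastc) cur [] (fun l => l ++ [c]) hitems hps_ne
        show (d.modify (pvKey c) ([] : List String) fun l => l ++ [c]).items = _
        rw [← hk]
        exact this
      have hres := ih (pvStepB d c) ps (cur ++ [c]) c (by rw [hstep, hk]) (hk ▸ hpw) (by simpa using hch')
      simp only [pvRunsAux, if_pos hk]
      exact hres
    · have hklt_c : pvKlt (pvKey lastc) (pvKey c) := ⟨hlc, hk⟩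
      have hall : ∀ p ∈ d.items, p.1 ≠ pvKey c := by
        intro p hp
        rw [hitems] at hp
        rcases List.mem_append.mp hp with hp | hp
        · exact (pvKlt_trans _ _ _ (hlast_klt p.1 (List.mem_map_of_mem hp)) hklt_c).2
        · have : p = (pvKey lastc, cur) := by simpa using hp
          rw [this]
          exact hk
      have hstep : (pvStepB d c).items = (ps ++ [(pvKey lastc, cur)]) ++ [(pvKey c, [c])] := by
        have := pv_modify_absent d (pvKey c) [] (fun l => l ++ [c]) hall
        show (d.modify (pvKey c) ([] : List String) fun l => l ++ [c]).items = _
        rw [this, hitems]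
        simp
      have hpw' : ((ps ++ [(pvKey lastc, cur)]).map Prod.fst ++ [pvKey c]).Pairwise pvKlt := by
        simp only [List.map_append, List.map_cons, List.map_nil, List.append_assoc]
        rw [← List.append_assoc]
        refine List.pairwise_append.mpr ⟨hpw, List.pairwise_singleton _ _, ?_⟩
        intro x hx y hy
        have hy' : y = pvKey c := by simpa using hy
        rcases List.mem_append.mp hx with hx | hx
        · exact hy' ▸ pvKlt_trans _ _ _ (hlast_klt x hx) hklt_c
        · have : x = pvKey lastc := by simpa using hx
          rw [this, hy']
          exact hklt_c
      have hres := ih (pvStepB d c) (ps ++ [(pvKey lastc, cur)]) [c] c (by rw [hstep]) hpw' (by simpa using hch')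
      simp only [pvRunsAux, if_neg hk]
      simpa using hres

lemma pv_B_eq (ri : List String) (h : ri ≠ []) :
    sortmycard_alt ri = pvGrp (PySem.List.sorted ri (fun x => x) false) := by
  rcases hE : PySem.List.sorted ri (fun x => x) false with _ | ⟨y, t⟩
  · exact absurd ((PySem.List.sorted_eq_nil_iff ri (fun x => x) false).mp hE) h
  · have hpw : (y :: t).Pairwise (fun a b : String => a ≤ b) := by
      have := PySem.List.sorted_pairwise ri (fun x : String => x)
      rw [hE] at this
      exact this
    have hch : (List.map pvKey (y :: t)).IsChain pvKle :=
      (hpw.map pvKey (fun a b hab => pvKle_mono a b hab)).isChain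
    have hd0 : (pvStepB (PySem.Dict.mk []) y).items = [] ++ [(pvKey y, [y])] := by
      have := pv_modify_absent (PySem.Dict.mk ([] : List ((Option Char) × List String)))
        (pvKey y) ([] : List String) (fun l => l ++ [y]) (by intro p hp; simp at hp)
      show (PySem.Dict.modify _ (pvKey y) _ _).items = _
      rw [this]
      simp
    have hres := pv_B_inv t (pvStepB (PySem.Dict.mk []) y) [] [y] y hd0
      (by simp) hch
    show PySem.Dict.values ((PySem.List.sorted ri (fun x => x) false).foldl pvStepB (PySem.Dict.mk [])) = _
    rw [hE, List.foldl_cons]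
    exact hres

-- ===== VERDICT (by name: the statement is the Claim_ definition above) =====
theorem sortmycard_spec : Claim_unchanged_sortmycard := by
  intro ri _ _ hnd
  have h : ri ≠ [] := hnd
  rw [pv_A_eq ri h, pv_B_eq ri h]

theorem sortmycard_changed : Claim_changed_sortmycard := by
  unfold Claim_changed_sortmycard; decide

theorem sortmycard_tight : Claim_exact_sortmycard := by
  intro ri _ _ hD
  subst hD
  decide
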